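-- pv_equiv track=rewrite | github.com/wlkaqw/python | 2527405018-5.py | func514
-- ===== SOURCE A (Python) =====
-- def func514(lst):
--     total = 0
--     prev_center_score = 0  # 记录上一次中心跳跃的得分，初始为0表示无连续中心跳跃
--     for action in lst:
--         if action == 0:
--             break
--         elif action == 1:
--             total += 1
--             prev_center_score = 0  # 非中心跳跃，重置连续中心标记
--         elif action == 2:
--             if prev_center_score == 0:
--                 # 第一次中心跳跃或上一次是1分
--                 current_score = 2
--             else:
--                 current_score = prev_center_score + 2
--             total += current_score
--             prev_center_score = current_score
--     return total
-- ===== SOURCE B (Python) =====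
-- def func514(lst):
--     # Phase 1: truncate at the first 0 and keep only 1s and 2s (other values are no-ops).
--     seq = []
--     for x in lst:
--         if x == 0:
--             break
--         if x == 1 or x == 2:
--             seq.append(x)
--     # Phase 2: each 1 scores 1; a maximal run of k consecutive 2s scores 2+4+...+2k = k*(k+1).
--     total = seq.count(1)
--     run = 0
--     for x in seq:
--         if x == 2:
--             run += 1
--         else:
--             total += run * (run + 1)
--             run = 0
--     return total + run * (run + 1)
-- ===== Notes on version B (the rewrite author's own statement) =====
-- stated objective: alternative
-- what changed: B replaces A's running prev_center_score state machine with a two-phase scheme: first truncate at the first 0 and filter to the scoring actions {1,2}, then count the 1s and add the closed form k*(k+1) for each maximal run of k consecutive 2s.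
import Mathlib
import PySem

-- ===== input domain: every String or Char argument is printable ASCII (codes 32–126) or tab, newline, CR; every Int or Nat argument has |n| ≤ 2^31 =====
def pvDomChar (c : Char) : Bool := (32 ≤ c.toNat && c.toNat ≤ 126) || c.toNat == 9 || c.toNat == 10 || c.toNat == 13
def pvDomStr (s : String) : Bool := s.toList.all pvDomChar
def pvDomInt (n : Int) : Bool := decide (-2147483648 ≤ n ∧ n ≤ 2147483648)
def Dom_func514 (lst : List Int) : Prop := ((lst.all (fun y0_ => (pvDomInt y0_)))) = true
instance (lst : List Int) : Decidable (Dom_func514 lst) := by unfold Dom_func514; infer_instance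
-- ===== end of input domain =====

-- B re-implements A's combo scoring by truncating at the first 0, filtering to {1,2}, counting 1s
-- and adding the closed form k*(k+1) per maximal run of k consecutive 2s (alternative decomposition).

-- ===== PORT A =====
-- the for-loop with break, carrying (total, prev_center_score)
def func514Loop : List Int → Int → Int → Int
  | [], total, _ => total
  | action :: rest, total, prev =>
    if action = 0 then total
    else if action = 1 then func514Loop rest (total + 1) 0
    else if action = 2 then
      let current : Int := if prev = 0 then 2 else prev + 2
      func514Loop rest (total + current) current
    else func514Loop rest total prev

def func514 (lst : List Int) : Int := func514Loop lst 0 0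

-- ===== PORT B =====
-- phase 1: truncate at the first 0 and keep only 1s and 2s
def func514Seq : List Int → List Int
  | [] => []
  | x :: r =>
    if x = 0 then []
    else if x = 1 ∨ x = 2 then x :: func514Seq r
    else func514Seq r

-- phase 2: the run-grouping loop (total accumulator, current run length of 2s)
def func514Runs : List Int → Int → Int → Int
  | [], total, run => total + run * (run + 1)
  | x :: r, total, run =>
    if x = 2 then func514Runs r total (run + 1)
    else func514Runs r (total + run * (run + 1)) 0

def func514_alt (lst : List Int) : Int :=
  func514Runs (func514Seq lst) ((PySem.List.count (func514Seq lst) 1 : Nat) : Int) 0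

-- ===== PRECONDITION & SPEC =====
def Spec_func514 (lst : List Int) (out : Int) : Prop := out = func514_alt lst
instance (lst : List Int) (out : Int) : Decidable (Spec_func514 lst out) := by unfold Spec_func514; infer_instance

-- ===== CLAIM (what is proved, stated in full; the proofs are below) =====
def Claim_equal_func514 : Prop := ∀ (lst : List Int), Dom_func514 lst → Spec_func514 lst (func514 lst)

-- ===== LEMMAS AND PROOFS =====

-- invariant: A's prev_center_score is 2*run where run is the current run of 2s; A has already
-- banked the partial run's 2+4+...+2*run = run*(run+1), B defers it to the run's end.
theorem func514_bridge (lst : List Int) : ∀ (t run : Int),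
    func514Loop lst t (2 * run)
      = func514Runs (func514Seq lst) (t - run * (run + 1) + ((PySem.List.count (func514Seq lst) 1 : Nat) : Int)) run := by
  induction lst with
  | nil => intro t run; simp [func514Loop, func514Seq, func514Runs, PySem.List.count]
  | cons x r ih =>
    intro t run
    by_cases h0 : x = 0
    · simp [func514Loop, func514Seq, func514Runs, h0, PySem.List.count]
    · by_cases h1 : x = 1
      · have : func514Loop (x :: r) t (2 * run) = func514Loop r (t + 1) (2 * 0) := by
          simp [func514Loop, h0, h1]
        rw [this, ih]
        simp [func514Seq, func514Runs, h0, h1, PySem.List.count, List.count_cons]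
        ring_nf
      · by_cases h2 : x = 2
        · have hcur : (if (2 * run : Int) = 0 then (2:Int) else 2 * run + 2) = 2 * (run + 1) := by
            split_ifs with h <;> omega
          have : func514Loop (x :: r) t (2 * run) = func514Loop r (t + 2 * (run + 1)) (2 * (run + 1)) := by
            simp only [func514Loop, h0, h1, h2, if_false, if_true, hcur]
            simp [hcur]
          rw [this, ih]
          have hseq : func514Seq (x :: r) = 2 :: func514Seq r := by simp [func514Seq, h0, h1, h2]
          rw [hseq]
          simp [func514Runs, PySem.List.count, List.count_cons, h2]
          ring_nf
        · have : func514Loop (x :: r) t (2 * run) = func514Loop r t (2 * run) := by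
            simp [func514Loop, h0, h1, h2]
          rw [this, ih]
          have hseq : func514Seq (x :: r) = func514Seq r := by
            simp [func514Seq, h0]
            exact ⟨h1, h2⟩
          rw [hseq]

-- ===== VERDICT (by name: the statement is the Claim_ definition above) =====
theorem func514_spec : Claim_equal_func514 := by
  intro lst _
  unfold Spec_func514 func514 func514_alt
  have := func514_bridge lst 0 0
  simpa using this
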